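-- pv_equiv track=rewrite | github.com/robinbenitezmora/Python-Practice | Beginner/2048_game.py | swipe_left
-- ===== SOURCE A (Python) =====
-- def swipe_left(board):
--     # Swipe the tiles to the left
--     new_board = []
--     for row in board:
--         new_row = [cell for cell in row if cell != 0]
--         for i in range(len(new_row) - 1):
--             if new_row[i] == new_row[i + 1]:
--                 new_row[i] *= 2
--                 new_row[i + 1] = 0
--         new_row = [cell for cell in new_row if cell != 0]
--         new_row += [0] * (4 - len(new_row))
--         new_board.append(new_row)
--     return new_board
-- ===== SOURCE B (Python) =====
-- def swipe_left(board):
--     # One-pass index merge over the compacted row (instead of merge-mark-zero then recompact).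
--     new_board = []
--     for row in board:
--         compacted = [c for c in row if c != 0]
--         result = []
--         i = 0
--         while i < len(compacted):
--             if i + 1 < len(compacted) and compacted[i] == compacted[i + 1]:
--                 result.append(compacted[i] * 2)
--                 i += 2
--             else:
--                 result.append(compacted[i])
--                 i += 1
--         result += [0] * (4 - len(result))
--         new_board.append(result)
--     return new_board
-- ===== Notes on version B (the rewrite author's own statement) =====
-- stated objective: simpler
-- what changed: Replaces A's three-pass row pipeline (compact, index loop that doubles and zero-marks in place, recompact) by a single index-driven merge pass over the compacted row that emits each output cell directly.
import Mathlib
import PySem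

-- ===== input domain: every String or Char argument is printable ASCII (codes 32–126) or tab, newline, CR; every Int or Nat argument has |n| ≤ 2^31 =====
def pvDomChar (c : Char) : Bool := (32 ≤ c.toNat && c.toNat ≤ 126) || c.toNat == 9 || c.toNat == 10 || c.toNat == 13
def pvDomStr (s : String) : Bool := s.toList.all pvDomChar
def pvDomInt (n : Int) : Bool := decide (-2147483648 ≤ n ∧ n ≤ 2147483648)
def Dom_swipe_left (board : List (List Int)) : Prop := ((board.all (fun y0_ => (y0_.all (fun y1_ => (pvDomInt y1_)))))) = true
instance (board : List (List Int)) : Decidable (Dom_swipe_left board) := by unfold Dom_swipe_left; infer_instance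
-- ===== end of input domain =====

-- B replaces A's three-pass row pipeline (compact, in-place double-and-zero-mark index loop,
-- recompact) by a single index-driven merge pass over the compacted row (objective: simpler).

-- ===== PORT A =====
-- one step of A's inner index loop: if new_row[i] == new_row[i+1]: new_row[i] *= 2; new_row[i+1] = 0
-- (indices i, i+1 are always in range when the fold below runs, so the total forms pyGetD/pySetD are exact)
def pvMarkStep (acc : List Int) (i : Int) : List Int :=
  if PySem.List.pyGetD acc i 0 = PySem.List.pyGetD acc (i + 1) 0 then
    PySem.List.pySetD (PySem.List.pySetD acc i (PySem.List.pyGetD acc i 0 * 2)) (i + 1) 0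
  else acc

def swipe_left (board : List (List Int)) : List (List Int) :=
  board.foldl (fun new_board row =>
    let new_row := row.filter (fun cell => cell ≠ 0)
    let new_row := (PySem.List.pyRange 0 ((new_row.length : Int) - 1) 1).foldl pvMarkStep new_row
    let new_row := new_row.filter (fun cell => cell ≠ 0)
    let new_row := new_row ++ List.replicate (4 - new_row.length) 0
    new_board ++ [new_row]) []

-- ===== PORT B =====
-- B's while loop over the explicit index i, as structural recursion on the suffix it inspects:
-- merge compacted[i] with compacted[i+1] when equal (advance by 2), else copy (advance by 1)
def pvMergeRow : List Int → List Int
  | [] => []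
  | [a] => [a]
  | a :: b :: rest => if a = b then a * 2 :: pvMergeRow rest else a :: pvMergeRow (b :: rest)

def swipe_left_alt (board : List (List Int)) : List (List Int) :=
  board.map (fun row =>
    let compacted := row.filter (fun cell => cell ≠ 0)
    let result := pvMergeRow compacted
    result ++ List.replicate (4 - result.length) 0)

-- ===== PRECONDITION & SPEC =====
def Spec_swipe_left (board : List (List Int)) (out : List (List Int)) : Prop := out = swipe_left_alt board
instance (board : List (List Int)) (out : List (List Int)) : Decidable (Spec_swipe_left board out) := by unfold Spec_swipe_left; infer_instance

-- ===== CLAIM (what is proved, stated in full; the proofs are below) =====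
def Claim_equal_swipe_left : Prop := ∀ (board : List (List Int)), Dom_swipe_left board → Spec_swipe_left board (swipe_left board)

-- ===== LEMMAS AND PROOFS =====

-- A's in-place mark pass, restated as structural recursion (proof helper)
def pvMarkRec : List Int → List Int
  | [] => []
  | [a] => [a]
  | a :: b :: rest => if a = b then a * 2 :: 0 :: pvMarkRec rest else a :: pvMarkRec (b :: rest)

lemma pvGet0 (pre t : List Int) (a : Int) :
    PySem.List.pyGetD (pre ++ a :: t) (pre.length : Int) 0 = a := by simp

lemma pvGet1 (pre t : List Int) (a b : Int) :
    PySem.List.pyGetD (pre ++ a :: b :: t) ((pre.length : Int) + 1) 0 = b := by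
  rw [PySem.List.pyGetD_eq_getElem _ _ (by positivity) (by simp)]
  have h : ((pre.length : Int) + 1).toNat = pre.length + 1 := by omega
  simp [h, List.getElem_append_right]

lemma pvSet0 (pre t : List Int) (a v : Int) :
    PySem.List.pySetD (pre ++ a :: t) (pre.length : Int) v = pre ++ v :: t := by simp

lemma pvSet1 (pre t : List Int) (a b v : Int) :
    PySem.List.pySetD (pre ++ a :: b :: t) ((pre.length : Int) + 1) v = pre ++ a :: v :: t := by
  rw [PySem.List.pySetD_of_nonneg _ _ (by positivity)]
  have h : ((pre.length : Int) + 1).toNat = pre.length + 1 := by omega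
  simp [h]

lemma pvMarkLoop : ∀ (xs pre : List Int), (∀ x ∈ xs, x ≠ 0) →
    (PySem.List.pyRange (pre.length : Int) ((pre.length : Int) + (xs.length : Int) - 1) 1).foldl
      pvMarkStep (pre ++ xs) = pre ++ pvMarkRec xs := by
  intro xs
  fun_induction pvMarkRec xs with
  | case1 => intro pre _; rw [PySem.List.pyRange_one_eq_nil (by simp)]; simp
  | case2 a => intro pre _; rw [PySem.List.pyRange_one_eq_nil (by simp)]; simp
  | case3 a rest ih =>
    intro pre hz
    rw [PySem.List.pyRange_one_cons (by simp; omega)]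
    simp only [List.foldl_cons]
    rw [show pvMarkStep (pre ++ a :: a :: rest) (pre.length : Int) = pre ++ a * 2 :: 0 :: rest by
      simp [pvMarkStep, pvGet0, pvGet1, pvSet0, pvSet1]]
    match rest, hz with
    | [], _ =>
      rw [PySem.List.pyRange_one_eq_nil (by simp; omega)]
      simp [pvMarkRec]
    | r :: rs, hz =>
      rw [PySem.List.pyRange_one_cons (by simp; omega)]
      simp only [List.foldl_cons]
      have hr : r ≠ 0 := hz r (by simp)
      rw [show pvMarkStep (pre ++ a * 2 :: 0 :: r :: rs) ((pre.length : Int) + 1) = pre ++ a * 2 :: 0 :: r :: rs by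
        have g1 : PySem.List.pyGetD (pre ++ a * 2 :: 0 :: r :: rs) ((pre.length : Int) + 1) 0 = 0 := by
          have := pvGet1 pre (r :: rs) (a * 2) 0; simpa using this
        have g2 : PySem.List.pyGetD (pre ++ a * 2 :: 0 :: r :: rs) ((pre.length : Int) + 1 + 1) 0 = r := by
          have := pvGet1 (pre ++ [a * 2]) (rs) 0 r
          simp only [List.append_assoc, List.cons_append, List.nil_append, List.length_append,
            List.length_cons, List.length_nil] at this ⊢
          rw [show (pre.length : Int) + 1 + 1 = ((pre.length + 1 : Nat) : Int) + 1 by push_cast; ring]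
          exact this
        simp [pvMarkStep, g1, g2, hr.symm]]
      have key := ih (pre ++ [a * 2, 0]) (fun x hx => hz x (by simp [hx]))
      simp only [List.length_append, List.length_cons, List.length_nil, List.append_assoc,
        List.cons_append, List.nil_append] at key
      push_cast at key ⊢
      rw [show (pre.length : Int) + 1 + 1 = (pre.length : Int) + 2 by ring]
      rw [show (pre.length : Int) + (((a :: a :: r :: rs).length : Nat) : Int) - 1
            = (pre.length : Int) + 2 + ((rs.length : Int) + 1) - 1 by simp; ring]
      exact key
  | case4 a b rest hab ih =>
    intro pre hz
    rw [PySem.List.pyRange_one_cons (by simp; omega)]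
    simp only [List.foldl_cons]
    rw [show pvMarkStep (pre ++ a :: b :: rest) (pre.length : Int) = pre ++ a :: b :: rest by
      simp [pvMarkStep, pvGet0, pvGet1, hab]]
    have key := ih (pre ++ [a]) (fun x hx => hz x (by simp [hx]))
    simp only [List.length_append, List.length_cons, List.length_nil, List.append_assoc,
      List.cons_append, List.nil_append] at key
    push_cast at key ⊢
    rw [show (pre.length : Int) + (((a :: b :: rest).length : Nat) : Int) - 1
          = (pre.length : Int) + 1 + ((rest.length : Int) + 1) - 1 by simp; ring]
    exact key

lemma pvFilterMark : ∀ xs : List Int, (∀ x ∈ xs, x ≠ 0) →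
    (pvMarkRec xs).filter (fun c => c ≠ 0) = pvMergeRow xs := by
  intro xs
  fun_induction pvMarkRec xs with
  | case1 => intro _; simp [pvMergeRow]
  | case2 a => intro h; simp [pvMergeRow, h a (by simp)]
  | case3 a rest ih =>
    intro h
    have ha : a ≠ 0 := h a (by simp)
    have h' := ih (fun x hx => h x (by simp [hx]))
    simp [pvMergeRow, ha]
    simpa using h'
  | case4 a b rest hab ih =>
    intro h
    have ha : a ≠ 0 := h a (by simp)
    have h' := ih (fun x hx => h x (by simp [hx]))
    simp [pvMergeRow, hab, ha]
    simpa using h'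

lemma pvMain (board : List (List Int)) : swipe_left board = swipe_left_alt board := by
  unfold swipe_left swipe_left_alt
  rw [show (List.foldl (fun new_board row =>
      new_board ++ [(fun row =>
        let new_row := row.filter (fun cell => cell ≠ 0)
        let new_row := (PySem.List.pyRange 0 ((new_row.length : Int) - 1) 1).foldl pvMarkStep new_row
        let new_row := new_row.filter (fun cell => cell ≠ 0)
        new_row ++ List.replicate (4 - new_row.length) 0) row]) [] board)
      = board.map _ from by simpa using PySem.List.foldl_append_singleton_eq_map _ board []]
  apply List.map_congr_left
  intro row _
  have hz : ∀ x ∈ row.filter (fun cell => cell ≠ 0), x ≠ 0 := by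
    intro x hx; simpa using (List.mem_filter.mp hx).2
  have hloop := pvMarkLoop (row.filter (fun cell => cell ≠ 0)) [] hz
  have hfm := pvFilterMark _ hz
  simp only [List.length_nil, Nat.cast_zero, List.nil_append, zero_add] at hloop
  simp at hloop hfm
  simp only [hloop, hfm]
  simp

-- ===== VERDICT (by name: the statement is the Claim_ definition above) =====
theorem swipe_left_spec : Claim_equal_swipe_left := fun board _ => pvMain board
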